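-- pv_equiv track=rewrite | github.com/BrentTanKian/advent-of-code | 2015/Day 11/2015_Day11_part1.py | pair_check
-- ===== SOURCE A (Python) =====
-- def pair_check(pwd):
--     pairs, i = [], 0
--     while i < len(pwd)-1:
--         cur_ele, next_ele = pwd[i], pwd[i+1]
--         if cur_ele == next_ele:
--             pairs.append(cur_ele*2)
--             i += 2
--             continue
--         i += 1
--     if len(set(pairs)) >= 2:
--         return True
--     return False
-- ===== SOURCE B (Python) =====
-- def pair_check(pwd):
--     return len({pwd[i] for i in range(len(pwd) - 1) if pwd[i] == pwd[i + 1]}) >= 2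
-- ===== Notes on version B (the rewrite author's own statement) =====
-- stated objective: simpler
-- what changed: Replaces A's non-overlapping while-loop with i+=2 skip and its list of doubled strings by a one-line overlapping scan that collects the doubling letters directly into a set; equivalent because the position the skip bypasses can only repeat the letter just counted.
import Mathlib
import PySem

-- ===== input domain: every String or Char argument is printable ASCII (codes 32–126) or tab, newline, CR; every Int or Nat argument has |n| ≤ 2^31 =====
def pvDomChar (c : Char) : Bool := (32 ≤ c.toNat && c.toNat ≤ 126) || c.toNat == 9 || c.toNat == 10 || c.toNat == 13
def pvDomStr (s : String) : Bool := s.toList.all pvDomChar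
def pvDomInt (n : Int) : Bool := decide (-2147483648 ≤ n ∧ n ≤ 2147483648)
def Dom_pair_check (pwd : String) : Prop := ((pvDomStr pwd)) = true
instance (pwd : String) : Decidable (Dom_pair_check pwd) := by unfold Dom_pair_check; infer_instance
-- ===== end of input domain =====

-- B replaces A's skip-by-2 while loop collecting doubled strings with a one-line overlapping
-- adjacent scan collecting the doubling letters into a set (objective: simpler).

-- ===== PORT A =====
-- A's while loop: i advances by 2 past a matched pair (skipping the next position), by 1 otherwise;
-- a matched pair appends the doubled string cur_ele*2 to `pairs`.
def pairsLoop : List Char → List String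
  | a :: b :: rest =>
      if a == b then String.ofList [a, a] :: pairsLoop rest
      else pairsLoop (b :: rest)
  | _ => []

def pair_check (pwd : String) : Bool :=
  let pairs := pairsLoop pwd.toList
  if 2 ≤ (PySem.Set.ofList pairs).length then true else false

-- ===== PORT B =====
-- set comprehension {pwd[i] for i in range(len(pwd)-1) if pwd[i] == pwd[i+1]}: the overlapping
-- adjacent positions are the zip of the list with its tail; filter, collect into a set.
def pair_check_alt (pwd : String) : Bool :=
  let l := pwd.toList
  let letters : PySem.Set Char :=
    PySem.Set.ofList ((l.zip l.tail).filterMap (fun p => if p.1 == p.2 then some p.1 else none))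
  decide (2 ≤ letters.length)

-- ===== PRECONDITION & SPEC =====
def Spec_pair_check (pwd : String) (out : Bool) : Prop := out = pair_check_alt pwd
instance (pwd : String) (out : Bool) : Decidable (Spec_pair_check pwd out) := by unfold Spec_pair_check; infer_instance

-- ===== CLAIM (what is proved, stated in full; the proofs are below) =====
def Claim_equal_pair_check : Prop := ∀ (pwd : String), Dom_pair_check pwd → Spec_pair_check pwd (pair_check pwd)

-- ===== LEMMAS AND PROOFS =====

-- B's list of letters at overlapping equal-adjacent positions, named for the proofs.
def lettersB (l : List Char) : List Char :=
  (l.zip l.tail).filterMap (fun p => if p.1 == p.2 then some p.1 else none)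

theorem lettersB_cons (x y : Char) (ys : List Char) :
    lettersB (x :: y :: ys) = (if x == y then [x] else []) ++ lettersB (y :: ys) := by
  simp only [lettersB, List.tail_cons, List.zip_cons_cons, List.filterMap_cons]
  by_cases h : x = y <;> simp [h]

theorem mem_lettersB_cons (c x : Char) (xs : List Char) :
    c ∈ lettersB (x :: xs) ↔ (c = x ∧ xs.head? = some x) ∨ c ∈ lettersB xs := by
  cases xs with
  | nil => simp [lettersB]
  | cons y ys =>
      rw [lettersB_cons]
      by_cases h : x = y
      · subst h
        simp only [beq_self_eq_true, if_true, List.singleton_append, List.mem_cons,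
          List.head?_cons]
        tauto
      · have hb : (x == y) = false := by simp [h]
        simp only [hb, Bool.false_eq_true, if_false, List.nil_append, List.head?_cons,
          Option.some.injEq]
        constructor
        · exact fun hm => Or.inr hm
        · rintro (⟨hc, hy⟩ | hm)
          · exact absurd hy.symm h
          · exact hm

-- every element A collects is a doubled string
theorem pairsLoop_shape (l : List Char) (s : String) (hs : s ∈ pairsLoop l) :
    ∃ c, s = String.ofList [c, c] := by
  fun_induction pairsLoop l with
  | case1 a b rest hab ih =>
      rcases List.mem_cons.mp hs with h | h
      · exact ⟨a, h⟩
      · exact ih h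
  | case2 a b rest hab ih => exact ih hs
  | case3 l h =>
      cases l with
      | nil => simp at hs
      | cons a t =>
          cases t with
          | nil => simp at hs
          | cons b r => exact absurd rfl (h a b r)

theorem ofList_pair_eq_iff (c a : Char) :
    String.ofList [c, c] = String.ofList [a, a] ↔ c = a := by
  constructor
  · intro h
    have := congrArg String.toList h
    simp at this
    exact this
  · intro h; rw [h]

-- key equivalence: letter c is collected (as its doubled string) by A's skipping scan
-- iff c occurs at some overlapping equal-adjacent position
theorem mem_pairsLoop_iff (c : Char) (l : List Char) :
    String.ofList [c, c] ∈ pairsLoop l ↔ c ∈ lettersB l := by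
  fun_induction pairsLoop l with
  | case1 a b rest hab ih =>
      have hb : a = b := by simpa using hab
      subst hb
      rw [List.mem_cons, ih, ofList_pair_eq_iff, mem_lettersB_cons, mem_lettersB_cons]
      simp only [List.head?_cons]
      tauto
  | case2 a b rest hab ih =>
      have hne : a ≠ b := by simpa using hab
      rw [ih]
      conv_rhs => rw [mem_lettersB_cons]
      simp only [List.head?_cons, Option.some.injEq]
      constructor
      · exact fun h => Or.inr h
      · rintro (⟨hc, hba⟩ | h)
        · exact absurd hba.symm hne
        · exact h
  | case3 l h =>
      cases l with
      | nil => simp [lettersB]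
      | cons a t =>
          cases t with
          | nil => simp [lettersB]
          | cons b r => exact absurd rfl (h a b r)

theorem dbl_injective : Function.Injective (fun c => String.ofList [c, c]) := by
  intro a b h
  have := congrArg String.toList h
  simp at this
  exact this

theorem sets_length_eq (l : List Char) :
    (PySem.Set.ofList (pairsLoop l)).length = (PySem.Set.ofList (lettersB l)).length := by
  have hP : (PySem.Set.ofList (pairsLoop l)).Nodup := PySem.Set.nodup_ofList _
  have hQ : ((PySem.Set.ofList (lettersB l)).map (fun c => String.ofList [c, c])).Nodup :=
    (PySem.Set.nodup_ofList _).map dbl_injective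
  have hperm : (PySem.Set.ofList (pairsLoop l)).Perm
      ((PySem.Set.ofList (lettersB l)).map (fun c => String.ofList [c, c])) := by
    rw [List.perm_ext_iff_of_nodup hP hQ]
    intro s
    rw [PySem.Set.mem_ofList]
    constructor
    · intro hs
      obtain ⟨c, rfl⟩ := pairsLoop_shape l s hs
      have hc : c ∈ lettersB l := (mem_pairsLoop_iff c l).mp hs
      exact List.mem_map.mpr ⟨c, (PySem.Set.mem_ofList ..).mpr hc, rfl⟩
    · intro hs
      obtain ⟨c, hc, rfl⟩ := List.mem_map.mp hs
      exact (mem_pairsLoop_iff c l).mpr ((PySem.Set.mem_ofList ..).mp hc)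
  calc (PySem.Set.ofList (pairsLoop l)).length
      = ((PySem.Set.ofList (lettersB l)).map (fun c => String.ofList [c, c])).length :=
        hperm.length_eq
    _ = (PySem.Set.ofList (lettersB l)).length := List.length_map ..

-- ===== VERDICT (by name: the statement is the Claim_ definition above) =====
theorem pair_check_spec : Claim_equal_pair_check := by
  intro pwd _
  unfold Spec_pair_check pair_check pair_check_alt
  dsimp only
  have h := sets_length_eq pwd.toList
  simp only [lettersB] at h
  rw [h]
  by_cases h2 : 2 ≤ (PySem.Set.ofList ((pwd.toList.zip pwd.toList.tail).filterMap
      (fun p => if p.1 == p.2 then some p.1 else none))).length <;> simp [h2]
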